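-- pv_equiv track=rewrite | github.com/Fondamenti18/fondamenti-di-programmazione | students/1823585/homework01/program03.py | Delete_chrs
-- ===== SOURCE A (Python) =====
-- def Delete_chrs(chiave,testo):
--     alfabeto_min = {0:'a',1:'b',2:'c',3:'d',\
--                     4:'e',5:'f',6:'g',7:'h',\
--                     8:'i',9:'j',10:'k',11:'l',\
--                     12:'m',13:'n',14:'o',15:'p',\
--                     16:'q',17:'r',18:'s',19:'t',\
--                     20:'u',21:'v',22:'w',23:'x', \
--                     24:'y',25:'z'}
--     Ls_k = list(chiave)
--     Min_di_Ls_k = []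
--     for c in range(len(Ls_k)):
--         for r in range(len(alfabeto_min)):
--             if Ls_k[c] == alfabeto_min[r]: Min_di_Ls_k += Ls_k[c]
--     for r in Min_di_Ls_k[:]:
--         Sup = Min_di_Ls_k.count(r)
--         if Sup > 1:
--             Pos_Init = Min_di_Ls_k.index(r)
--             del Min_di_Ls_k[Pos_Init]
--     return Min_di_Ls_k
-- ===== SOURCE B (Python) =====
-- def Delete_chrs(chiave, testo):
--     # one backward pass: keep each lowercase letter's last occurrence, preserving order
--     LOWER = set('abcdefghijklmnopqrstuvwxyz')
--     seen = set()
--     out = []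
--     for c in reversed(list(chiave)):
--         if c in LOWER and c not in seen:
--             seen.add(c)
--             out.append(c)
--     out.reverse()
--     return out
-- ===== Notes on version B (the rewrite author's own statement) =====
-- stated objective: faster
-- what changed: A scans a 26-entry dict per character and then dedups with repeated count/index/del passes over the list; B does one backward pass with a constant-time 'seen' set (keeping each lowercase letter's last occurrence) and reverses the result.
import Mathlib
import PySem

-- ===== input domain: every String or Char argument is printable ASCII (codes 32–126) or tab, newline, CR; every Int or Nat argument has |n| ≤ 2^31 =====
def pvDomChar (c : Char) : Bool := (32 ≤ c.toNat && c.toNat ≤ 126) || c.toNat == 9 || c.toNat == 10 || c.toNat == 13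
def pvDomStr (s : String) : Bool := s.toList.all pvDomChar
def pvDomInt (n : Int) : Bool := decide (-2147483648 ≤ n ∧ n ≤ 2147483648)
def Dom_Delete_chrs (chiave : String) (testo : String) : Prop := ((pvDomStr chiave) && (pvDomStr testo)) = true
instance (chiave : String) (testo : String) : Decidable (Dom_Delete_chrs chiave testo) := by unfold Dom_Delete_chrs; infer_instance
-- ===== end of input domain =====

-- B replaces A's 26-way dict scan per character and its count/index/del dedup loop with a single
-- backward pass keeping a 'seen' set (objective: faster).

def pvSing (c : Char) : String := String.ofList [c]

-- ===== PORT A =====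
def pvAlfabeto : PySem.Dict Int Char :=
  PySem.Dict.ofList [(0,'a'),(1,'b'),(2,'c'),(3,'d'),(4,'e'),(5,'f'),(6,'g'),(7,'h'),(8,'i'),(9,'j'),
                     (10,'k'),(11,'l'),(12,'m'),(13,'n'),(14,'o'),(15,'p'),(16,'q'),(17,'r'),(18,'s'),
                     (19,'t'),(20,'u'),(21,'v'),(22,'w'),(23,'x'),(24,'y'),(25,'z')]

-- inner loop 'for r in range(len(alfabeto_min)): if Ls_k[c] == alfabeto_min[r]: Min_di_Ls_k += Ls_k[c]'
-- (the dict lookup alfabeto_min[r] always hits: r ranges over exactly the keys 0..25, so getD is exact)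
def pvInnerA (x : Char) (acc : List String) : List String :=
  (PySem.List.pyRange 0 (PySem.Dict.size pvAlfabeto : Int) 1).foldl
    (fun a r => if x = PySem.Dict.getD pvAlfabeto r ' ' then a ++ [pvSing x] else a) acc

-- 'Pos_Init = Min_di_Ls_k.index(r); del Min_di_Ls_k[Pos_Init]' — executed only when count > 1, so r is
-- present and index?/pop? are some; the none fallbacks are unreachable
def pvDelFirst (m : List String) (r : String) : List String :=
  match PySem.List.index? m r with
  | some i =>
    match PySem.List.pop? m (i : Int) with
    | some p => p.2
    | none => m
  | none => m

def Delete_chrs (chiave : String) (testo : String) : List String :=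
  let lsK := chiave.toList
  let min1 := (PySem.List.pyRange 0 (lsK.length : Int) 1).foldl
    (fun acc c => pvInnerA (PySem.List.pyGetD lsK c ' ') acc) []
  min1.foldl (fun m r => if PySem.List.count m r > 1 then pvDelFirst m r else m) min1

-- ===== PORT B =====
def pvLower : PySem.Set Char := PySem.Set.ofList (String.toList "abcdefghijklmnopqrstuvwxyz")

def pvStepB (st : PySem.Set Char × List String) (c : Char) : PySem.Set Char × List String :=
  if PySem.Set.contains pvLower c && !PySem.Set.contains st.1 c then
    (PySem.Set.add st.1 c, st.2 ++ [pvSing c])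
  else st

def Delete_chrs_alt (chiave : String) (testo : String) : List String :=
  ((chiave.toList.reverse.foldl pvStepB (PySem.Set.empty, [])).2).reverse

-- ===== PRECONDITION & SPEC =====
def Spec_Delete_chrs (chiave : String) (testo : String) (out : List String) : Prop := out = Delete_chrs_alt chiave testo
instance (chiave : String) (testo : String) (out : List String) : Decidable (Spec_Delete_chrs chiave testo out) := by unfold Spec_Delete_chrs; infer_instance

-- ===== CLAIM (what is proved, stated in full; the proofs are below) =====
def Claim_equal_Delete_chrs : Prop := ∀ (chiave : String) (testo : String), Dom_Delete_chrs chiave testo → Spec_Delete_chrs chiave testo (Delete_chrs chiave testo)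

-- ===== LEMMAS AND PROOFS =====

def pvAz : List Char := String.toList "abcdefghijklmnopqrstuvwxyz"

theorem pvSing_inj : Function.Injective pvSing := by
  intro a b h
  have h2 := congrArg String.toList h
  simp only [pvSing, String.toList_ofList, List.cons.injEq, and_true] at h2
  exact h2

-- A's inner loop is a fold over the 26 letters
theorem pvInnerA_eq_foldl_az (x : Char) (acc : List String) :
    pvInnerA x acc = pvAz.foldl (fun a ch => if x = ch then a ++ [pvSing x] else a) acc := rfl

theorem foldl_eq_of_nodup (l : List Char) (hl : l.Nodup) (x : Char) (acc : List String) :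
    l.foldl (fun a ch => if x = ch then a ++ [pvSing x] else a) acc
      = acc ++ (if x ∈ l then [pvSing x] else []) := by
  induction l generalizing acc with
  | nil => simp
  | cons a t ih =>
    rcases List.nodup_cons.mp hl with ⟨hat, hnt⟩
    by_cases hx : x = a
    · subst hx
      simp only [List.foldl_cons, if_pos rfl]
      rw [ih hnt]
      simp [hat]
    · simp only [List.foldl_cons, if_neg hx]
      rw [ih hnt]
      simp [hx]

theorem pvInnerA_eq (x : Char) (acc : List String) :
    pvInnerA x acc = acc ++ (if x ∈ pvAz then [pvSing x] else []) := by
  rw [pvInnerA_eq_foldl_az]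
  exact foldl_eq_of_nodup pvAz (by decide) x acc

-- phase 1 of A builds the lowercase letters of chiave, as one-char strings
theorem foldlA_eq (cs : List Char) (acc : List String) :
    cs.foldl (fun a x => pvInnerA x a) acc
      = acc ++ (cs.filter (fun c => decide (c ∈ pvAz))).map pvSing := by
  induction cs generalizing acc with
  | nil => simp
  | cons c t ih =>
    simp only [List.foldl_cons]
    rw [pvInnerA_eq, ih]
    by_cases hc : c ∈ pvAz
    · simp [hc]
    · simp [hc]

theorem phase1_eq (cs : List Char) :
    (PySem.List.pyRange 0 (cs.length : Int) 1).foldl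
        (fun acc c => pvInnerA (PySem.List.pyGetD cs c ' ') acc) []
      = (cs.filter (fun c => decide (c ∈ pvAz))).map pvSing := by
  rw [PySem.List.foldl_pyRange_zero_pyGetD' cs ' ' (fun acc x => pvInnerA x acc) []]
  simpa using foldlA_eq cs []

theorem eraseIdx_junction (q l' : List String) (r : String) :
    (q ++ r :: l').eraseIdx q.length = q ++ l' := by
  induction q with
  | nil => simp
  | cons a t ih => simpa using ih

theorem pvDelFirst_junction (q l' : List String) (r : String) (hrq : r ∉ q) :
    pvDelFirst (q ++ r :: l') r = q ++ l' := by
  have hidx : PySem.List.index? (q ++ r :: l') r = some q.length :=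
    (PySem.List.index?_eq_some_iff _ _ _).mpr ⟨q, l', rfl, rfl, hrq⟩
  have hlen : q.length < (q ++ r :: l').length := by simp
  have hpop := PySem.List.pop?_natCast (xs := q ++ r :: l') (n := q.length) hlen
  unfold pvDelFirst
  rw [hidx]
  simp only [hpop]
  exact eraseIdx_junction q l' r

-- phase 2 of A keeps the last occurrence of each element (= Mathlib's List.dedup)
theorem phase2_eq (l q : List String) (hq : ∀ x ∈ q, x ∉ l) :
    l.foldl (fun m r => if PySem.List.count m r > 1 then pvDelFirst m r else m) (q ++ l)
      = q ++ l.dedup := by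
  induction l generalizing q with
  | nil => simp
  | cons r l' ih =>
    have hrq : r ∉ q := fun h => hq r h (List.mem_cons_self)
    have hcount : PySem.List.count (q ++ r :: l') r = l'.count r + 1 := by
      rw [PySem.List.count_eq]
      simp [List.count_append, List.count_eq_zero.mpr hrq]
    simp only [List.foldl_cons, hcount]
    by_cases hr : r ∈ l'
    · have hgt : l'.count r + 1 > 1 := by
        have := List.count_pos_iff.mpr hr
        omega
      rw [if_pos hgt, pvDelFirst_junction q l' r hrq]
      rw [ih q (fun x hx => fun hxl => hq x hx (List.mem_cons_of_mem r hxl))]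
      rw [List.dedup_cons_of_mem hr]
    · have hng : ¬ (l'.count r + 1 > 1) := by
        have := List.count_eq_zero.mpr hr
        omega
      rw [if_neg hng]
      have hstate : q ++ r :: l' = (q ++ [r]) ++ l' := by simp
      rw [hstate, ih (q ++ [r]) ?_]
      · rw [List.dedup_cons_of_notMem hr]
        simp
      · intro x hx
        rcases List.mem_append.mp hx with h | h
        · exact fun hxl => hq x h (List.mem_cons_of_mem r hxl)
        · simp only [List.mem_singleton] at h; subst h; exact hr

theorem delete_chrs_eq_dedup (chiave testo : String) :
    Delete_chrs chiave testo
      = ((chiave.toList.filter (fun c => decide (c ∈ pvAz))).map pvSing).dedup := by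
  simp only [Delete_chrs]
  rw [phase1_eq]
  have h := phase2_eq ((chiave.toList.filter (fun c => decide (c ∈ pvAz))).map pvSing) []
    (fun x hx => absurd hx List.not_mem_nil)
  simpa using h

-- B-side lemmas
theorem pvLower_eq : pvLower = pvAz := by
  have h := PySem.Set.ofList_eq_self_of_nodup (xs := pvAz) (by decide)
  exact h

theorem filter_discard (t : List Char) (c : Char) (p : Char → Bool) (hpc : p c = false) :
    (PySem.Set.discard t c).filter p = t.filter p := by
  show (t.filter (fun y => !(y == c))).filter p = t.filter p
  rw [List.filter_filter]
  apply List.filter_congr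
  intro a _
  by_cases hac : a = c
  · subst hac; simp [hpc]
  · simp [hac]

-- filtering out 'already seen for s ++ [c]' is filtering out c, then 'seen for s'
theorem seen_append_filter (t s : List Char) (c : Char) :
    t.filter (fun y => !decide (y ∈ s ++ [c]))
      = (PySem.Set.discard t c).filter (fun y => !decide (y ∈ s)) := by
  show _ = (t.filter (fun y => !(y == c))).filter (fun y => !decide (y ∈ s))
  rw [List.filter_filter]
  apply List.filter_congr
  intro a _
  by_cases hac : a = c
  · subst hac; simp
  · by_cases has : a ∈ s
    · simp [hac, has]
    · simp [hac, has]

-- the backward loop of B collects (into .2) the unseen lowercase first occurrences, in order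
theorem stepB_fold (ys : List Char) (s : PySem.Set Char) (out : List String) :
    (ys.foldl pvStepB (s, out)).2
      = out ++ ((PySem.Set.ofList (ys.filter (fun c => decide (c ∈ pvLower)))).filter
          (fun c => !decide (c ∈ s))).map pvSing := by
  induction ys generalizing s out with
  | nil => simp
  | cons c ys ih =>
    simp only [List.foldl_cons]
    by_cases hcl : c ∈ pvLower
    · by_cases hcs : c ∈ s
      · have hstep : pvStepB (s, out) c = (s, out) := by
          simp [pvStepB, hcl, hcs]
        rw [hstep, ih s out, List.filter_cons_of_pos (by simp [hcl]), PySem.Set.ofList_cons,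
          List.filter_cons_of_neg (by simp [hcs]),
          filter_discard _ c _ (by simp [hcs])]
      · have hstep : pvStepB (s, out) c = (PySem.Set.add s c, out ++ [pvSing c]) := by
          simp [pvStepB, hcl, hcs]
        have hadd : PySem.Set.add s c = s ++ [c] := PySem.Set.add_of_not_mem hcs
        rw [hstep, hadd, ih (s ++ [c]) (out ++ [pvSing c]),
          List.filter_cons_of_pos (by simp [hcl]), PySem.Set.ofList_cons,
          List.filter_cons_of_pos (by simp [hcs]),
          seen_append_filter]
        simp
    · have hstep : pvStepB (s, out) c = (s, out) := by
        simp [pvStepB, hcl]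
      rw [hstep, ih s out, List.filter_cons_of_neg (by simp [hcl])]

theorem ofList_reverse_reverse (l : List Char) :
    (PySem.Set.ofList l.reverse).reverse = l.dedup := by
  induction l with
  | nil => rfl
  | cons x xs ih =>
    rw [List.reverse_cons, PySem.Set.ofList_append_singleton]
    by_cases hx : x ∈ xs
    · have hmem : x ∈ PySem.Set.ofList xs.reverse := by
        rw [PySem.Set.mem_ofList, List.mem_reverse]; exact hx
      rw [PySem.Set.add_of_mem hmem, ih, List.dedup_cons_of_mem hx]
    · have hmem : x ∉ PySem.Set.ofList xs.reverse := by
        rw [PySem.Set.mem_ofList, List.mem_reverse]; exact hx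
      rw [PySem.Set.add_of_not_mem hmem, List.reverse_append, ih,
        List.dedup_cons_of_notMem hx]
      rfl

theorem dedup_map_sing (l : List Char) :
    (l.map pvSing).dedup = l.dedup.map pvSing := by
  induction l with
  | nil => rfl
  | cons x xs ih =>
    by_cases hx : x ∈ xs
    · rw [List.map_cons, List.dedup_cons_of_mem (List.mem_map_of_mem hx),
        List.dedup_cons_of_mem hx, ih]
    · rw [List.map_cons, List.dedup_cons_of_notMem ?_, List.dedup_cons_of_notMem hx, ih,
        List.map_cons]
      intro hmem
      rcases List.mem_map.mp hmem with ⟨y, hy, hxy⟩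
      exact hx ((pvSing_inj hxy) ▸ hy)

theorem delete_chrs_alt_eq_dedup (chiave testo : String) :
    Delete_chrs_alt chiave testo
      = ((chiave.toList.filter (fun c => decide (c ∈ pvAz))).map pvSing).dedup := by
  unfold Delete_chrs_alt
  rw [stepB_fold, pvLower_eq]
  rw [List.filter_reverse]
  have hall : ∀ x ∈ PySem.Set.ofList (chiave.toList.filter (fun c => decide (c ∈ pvAz))).reverse,
      (fun c => !decide (c ∈ (PySem.Set.empty : PySem.Set Char))) x = true := by
    intro x _
    simp [PySem.Set.empty]
  rw [List.filter_eq_self.mpr hall]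
  rw [List.nil_append, ← List.map_reverse, ofList_reverse_reverse, dedup_map_sing]

-- ===== VERDICT (by name: the statement is the Claim_ definition above) =====
theorem Delete_chrs_spec : Claim_equal_Delete_chrs := by
  intro chiave testo _
  unfold Spec_Delete_chrs
  rw [delete_chrs_eq_dedup, delete_chrs_alt_eq_dedup]
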